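-- pv_equiv track=rewrite | github.com/charlestian23/hackerrank | Python/GamingArray.py | gamingArray
-- ===== SOURCE A (Python) =====
-- def gamingArray(arr):
--     max_count = 1
--     current_max = arr[0]
--     for i in range(1, len(arr)):
--         if arr[i] > current_max:
--             max_count += 1
--             current_max = arr[i]
--     if max_count % 2 == 1:
--         return "BOB"
--     return "ANDY"
-- ===== SOURCE B (Python) =====
-- def gamingArray(arr):
--     # Simulate the game: each move removes the current maximum and everything
--     # after it; count moves and return the winner by parity.
--     a = list(arr)
--     moves = 0
--     while a:
--         idx = 0
--         for j in range(1, len(a)):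
--             if a[j] > a[idx]:
--                 idx = j
--         moves += 1
--         a = a[:idx]
--     return "BOB" if moves % 2 == 1 else "ANDY"
-- ===== Notes on version B (the rewrite author's own statement) =====
-- stated objective: alternative
-- what changed: B replaces A's single-pass prefix-maxima counter with a direct simulation of the game: repeatedly find the index of the current maximum and truncate the list before it, counting moves; the move count equals A's prefix-maxima count.
import Mathlib
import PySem

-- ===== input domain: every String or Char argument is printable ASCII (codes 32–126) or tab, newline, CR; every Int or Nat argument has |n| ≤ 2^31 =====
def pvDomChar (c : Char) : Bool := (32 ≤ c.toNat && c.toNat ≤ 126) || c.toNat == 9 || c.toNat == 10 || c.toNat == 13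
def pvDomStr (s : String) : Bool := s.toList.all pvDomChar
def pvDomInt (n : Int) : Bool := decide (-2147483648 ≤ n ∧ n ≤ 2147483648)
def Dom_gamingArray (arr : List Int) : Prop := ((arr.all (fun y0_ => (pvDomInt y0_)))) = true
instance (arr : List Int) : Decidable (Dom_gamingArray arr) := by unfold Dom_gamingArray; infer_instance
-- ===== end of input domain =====

-- B simulates the game move by move (find the max, truncate before it) instead of
-- counting prefix maxima in one pass; objective: alternative (B is O(n^2), A is O(n)).

-- ===== PORT A =====
-- A: single pass counting strict prefix maxima; "" stands for the IndexError of arr[0] on [] (outside Pre_).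
def gamingArray (arr : List Int) : String :=
  match PySem.List.pyGet? arr 0 with
  | none => ""
  | some a0 =>
    let st := (PySem.List.pyRange 1 (PySem.List.len arr) 1).foldl
      (fun (s : Int × Int) i =>
        if PySem.List.pyGetD arr i 0 > s.2 then (s.1 + 1, PySem.List.pyGetD arr i 0) else s)
      (1, a0)
    if st.1 % 2 == 1 then "BOB" else "ANDY"

-- ===== PORT B =====
-- index of the first maximum of a, found by B's inner manual scan
def altMaxIdx (a : List Int) : Int :=
  (PySem.List.pyRange 1 (PySem.List.len a) 1).foldl
    (fun idx j => if PySem.List.pyGetD a j 0 > PySem.List.pyGetD a idx 0 then j else idx) 0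

-- B's outer while-loop: count moves, truncating the board to a[:idx] each move
-- (fuel = initial length is a pure totality guard: each move strictly shortens the board)
def altLoop (fuel : Nat) (a : List Int) (moves : Int) : Int :=
  match fuel with
  | 0 => moves
  | f + 1 =>
    if a = [] then moves
    else altLoop f (PySem.List.slice a none (some (altMaxIdx a))) (moves + 1)

def gamingArray_alt (arr : List Int) : String :=
  if altLoop arr.length arr 0 % 2 == 1 then "BOB" else "ANDY"

-- ===== PRECONDITION & SPEC =====
-- Pre_ excludes only the empty list, on which A raises IndexError (arr[0]).
def Pre_gamingArray (arr : List Int) : Prop := arr ≠ []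
instance (arr : List Int) : Decidable (Pre_gamingArray arr) := by unfold Pre_gamingArray; infer_instance
def pvWitness_gamingArray : List Int := [3, 1, 2]

def Spec_gamingArray (arr : List Int) (out : String) : Prop := out = gamingArray_alt arr
instance (arr : List Int) (out : String) : Decidable (Spec_gamingArray arr out) := by unfold Spec_gamingArray; infer_instance

-- ===== CLAIM (what is proved, stated in full; the proofs are below) =====
def Claim_equal_gamingArray : Prop := ∀ (arr : List Int), Dom_gamingArray arr → Pre_gamingArray arr → Spec_gamingArray arr (gamingArray arr)

-- ===== LEMMAS AND PROOFS =====

-- invariant of the inner scan: first index of the maximum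
lemma altMaxIdx_spec (a : List Int) (h : a ≠ []) :
    0 ≤ altMaxIdx a ∧ altMaxIdx a < (a.length : Int) ∧
    (∀ j : Int, 0 ≤ j → j < (a.length : Int) →
      PySem.List.pyGetD a j 0 ≤ PySem.List.pyGetD a (altMaxIdx a) 0) ∧
    (∀ j : Int, 0 ≤ j → j < altMaxIdx a →
      PySem.List.pyGetD a j 0 < PySem.List.pyGetD a (altMaxIdx a) 0) := by
  have key : ∀ b : Int, 1 ≤ b →
      (let r := (PySem.List.pyRange 1 b 1).foldl
        (fun idx j => if PySem.List.pyGetD a j 0 > PySem.List.pyGetD a idx 0 then j else idx) 0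
      0 ≤ r ∧ r < b ∧
      (∀ j : Int, 0 ≤ j → j < b → PySem.List.pyGetD a j 0 ≤ PySem.List.pyGetD a r 0) ∧
      (∀ j : Int, 0 ≤ j → j < r → PySem.List.pyGetD a j 0 < PySem.List.pyGetD a r 0)) := by
    intro b hb
    induction b, hb using Int.le_induction with
    | base =>
      simp only [PySem.List.pyRange_one_eq_nil (le_refl (1 : Int)), List.foldl_nil]
      refine ⟨le_refl _, by omega, ?_, by omega⟩
      intro j hj0 hj1
      have : j = 0 := by omega
      subst this; exact le_refl _
    | succ b hb ih =>
      rw [PySem.List.pyRange_one_succ_right (by omega : (1:Int) ≤ b), List.foldl_append]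
      obtain ⟨h0, hlt, hmax, hfirst⟩ := ih
      simp only [List.foldl_cons, List.foldl_nil]
      set r := (PySem.List.pyRange 1 b 1).foldl
        (fun idx j => if PySem.List.pyGetD a j 0 > PySem.List.pyGetD a idx 0 then j else idx) 0 with hr
      by_cases hc : PySem.List.pyGetD a b 0 > PySem.List.pyGetD a r 0
      · simp only [hc, if_pos]
        refine ⟨by omega, by omega, ?_, ?_⟩
        · intro j hj0 hj1
          rcases lt_or_ge j b with hjb | hjb
          · exact le_of_lt (lt_of_le_of_lt (hmax j hj0 hjb) hc)
          · have : j = b := by omega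
            subst this; exact le_refl _
        · intro j hj0 hjb
          rcases lt_or_ge j r with hjr | hjr
          · exact lt_trans (hfirst j hj0 hjr) hc
          · exact lt_of_le_of_lt (hmax j hj0 (by omega)) hc
      · simp only [hc, if_neg, not_false_iff]
        refine ⟨h0, by omega, ?_, hfirst⟩
        intro j hj0 hj1
        rcases lt_or_ge j b with hjb | hjb
        · exact hmax j hj0 hjb
        · have : j = b := by omega
          subst this; omega
  have hlen : (1 : Int) ≤ (a.length : Int) := by
    have : a.length ≠ 0 := fun hh => h (List.length_eq_zero_iff.mp hh)
    omega
  have := key (a.length : Int) hlen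
  simpa only [altMaxIdx, PySem.List.len_eq] using this

-- number of strict records of l above running maximum m
def recs (m : Int) : List Int → Int
  | [] => 0
  | x :: t => if m < x then 1 + recs x t else recs m t

-- total record count of a board (A's max_count; 0 on an empty board)
def recTotal : List Int → Int
  | [] => 0
  | x :: t => 1 + recs x t

lemma recs_nonpos (m : Int) (l : List Int) (h : ∀ x ∈ l, x ≤ m) : recs m l = 0 := by
  induction l generalizing m with
  | nil => rfl
  | cons x t ih =>
    have hx := h x (List.mem_cons_self)
    simp only [recs, if_neg (by omega : ¬ m < x)]
    exact ih m (fun y hy => h y (List.mem_cons_of_mem _ hy))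

lemma recs_append (m : Int) (u l : List Int) :
    recs m (u ++ l) = recs m u + recs (u.foldl max m) l := by
  induction u generalizing m with
  | nil => simp [recs]
  | cons x t ih =>
    by_cases h : m < x
    · simp only [List.cons_append, recs, if_pos h, List.foldl_cons, ih x,
        max_eq_right (le_of_lt h)]
      ring
    · simp only [List.cons_append, recs, if_neg h, List.foldl_cons, ih m,
        max_eq_left (by omega : x ≤ m)]

lemma foldl_max_lt (v : Int) (u : List Int) : ∀ (m : Int), m < v → (∀ x ∈ u, x < v) →
    u.foldl max m < v := by
  induction u with
  | nil => intro m hm _; exact hm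
  | cons x t ih =>
    intro m hm hu
    simp only [List.foldl_cons]
    exact ih _ (max_lt hm (hu x List.mem_cons_self)) (fun y hy => hu y (List.mem_cons_of_mem _ hy))

-- splitting the board at the first maximum drops exactly one record
lemma recTotal_split (u : List Int) (v : Int) (w : List Int)
    (hu : ∀ x ∈ u, x < v) (hw : ∀ x ∈ w, x ≤ v) :
    recTotal (u ++ v :: w) = recTotal u + 1 := by
  cases u with
  | nil =>
    simp only [List.nil_append, recTotal, recs_nonpos v w hw]
    ring
  | cons a0 t =>
    have ha0 : a0 < v := hu a0 List.mem_cons_self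
    have ht : ∀ x ∈ t, x < v := fun y hy => hu y (List.mem_cons_of_mem _ hy)
    simp only [List.cons_append, recTotal, recs_append]
    have hM : t.foldl max a0 < v := foldl_max_lt v t a0 ha0 ht
    simp only [recs, if_pos hM, recs_nonpos v w hw]
    ring

lemma pyGetD_take_lt (a : List Int) (k : Nat) (hk : k < a.length)
    (x : Int) (hx : x ∈ a.take k)
    (h : ∀ j : Int, 0 ≤ j → j < (k : Int) → PySem.List.pyGetD a j 0 < PySem.List.pyGetD a (k : Int) 0) :
    x < a[k] := by
  obtain ⟨i, hi, hxe⟩ := List.mem_iff_getElem.mp hx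
  have hik : i < k := by
    have := hi; simp only [List.length_take] at this; omega
  have hia : i < a.length := by omega
  have hthis := h (i : Int) (by omega) (by exact_mod_cast hik)
  rw [PySem.List.pyGetD_eq_getElem a (i := (i : Int)) 0 (by omega) (by exact_mod_cast hia),
      PySem.List.pyGetD_eq_getElem a (i := (k : Int)) 0 (by omega) (by exact_mod_cast hk)] at hthis
  simp only [Int.toNat_natCast] at hthis
  rw [← hxe]
  simpa [List.getElem_take] using hthis

lemma pyGetD_mem_le (a : List Int) (k : Nat) (hk : k < a.length)
    (x : Int) (hx : x ∈ a)
    (h : ∀ j : Int, 0 ≤ j → j < (a.length : Int) → PySem.List.pyGetD a j 0 ≤ PySem.List.pyGetD a (k : Int) 0) :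
    x ≤ a[k] := by
  obtain ⟨i, hi, hxe⟩ := List.mem_iff_getElem.mp hx
  have hthis := h (i : Int) (by omega) (by exact_mod_cast hi)
  rw [PySem.List.pyGetD_eq_getElem a (i := (i : Int)) 0 (by omega) (by exact_mod_cast hi),
      PySem.List.pyGetD_eq_getElem a (i := (k : Int)) 0 (by omega) (by exact_mod_cast hk)] at hthis
  simp only [Int.toNat_natCast] at hthis
  rw [← hxe]; exact hthis

-- one move of the simulation removes exactly one record
lemma recTotal_step (a : List Int) (h : a ≠ []) :
    recTotal a = recTotal (PySem.List.slice a none (some (altMaxIdx a))) + 1 := by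
  obtain ⟨h0, hlt, hmax, hfirst⟩ := altMaxIdx_spec a h
  rw [PySem.List.slice_to a h0]
  set k := (altMaxIdx a).toNat with hkdef
  have hkl : k < a.length := by omega
  have hki : ((k : Nat) : Int) = altMaxIdx a := by omega
  have hu : ∀ x ∈ a.take k, x < a[k] := by
    intro x hx
    refine pyGetD_take_lt a k hkl x hx ?_
    intro j hj0 hjk
    rw [hki]
    exact hfirst j hj0 (by omega)
  have hw : ∀ x ∈ a.drop (k + 1), x ≤ a[k] := by
    intro x hx
    refine pyGetD_mem_le a k hkl x (List.mem_of_mem_drop hx) ?_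
    intro j hj0 hjl
    rw [hki]
    exact hmax j hj0 hjl
  have hsplit : a.take k ++ a[k] :: a.drop (k + 1) = a := by
    rw [List.getElem_cons_drop, List.take_append_drop]
  calc recTotal a = recTotal (a.take k ++ a[k] :: a.drop (k + 1)) := by rw [hsplit]
    _ = recTotal (a.take k) + 1 := recTotal_split _ _ _ hu hw

-- B's loop counts recTotal whenever it has enough fuel
lemma altLoop_eq (fuel : Nat) (a : List Int) (m : Int) (hf : a.length ≤ fuel) :
    altLoop fuel a m = m + recTotal a := by
  induction fuel generalizing a m with
  | zero =>
    have ha : a = [] := List.eq_nil_of_length_eq_zero (by omega)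
    subst ha
    simp [altLoop, recTotal]
  | succ f ih =>
    by_cases h : a = []
    · subst h
      simp [altLoop, recTotal]
    · obtain ⟨h0, hlt, -, -⟩ := altMaxIdx_spec a h
      have hlen : (PySem.List.slice a none (some (altMaxIdx a))).length ≤ f := by
        rw [PySem.List.slice_to a h0]
        simp only [List.length_take]
        omega
      simp only [altLoop, if_neg h]
      rw [ih _ _ hlen, recTotal_step a h]
      ring

-- A's fold counts records
lemma foldA (t : List Int) (c m : Int) :
    (t.foldl (fun (s : Int × Int) v => if v > s.2 then (s.1 + 1, v) else s) (c, m)).1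
      = c + recs m t := by
  induction t generalizing c m with
  | nil => simp [recs]
  | cons x t ih =>
    by_cases h : x > m
    · simp only [List.foldl_cons, if_pos h, ih, recs]
      ring
    · simp only [List.foldl_cons, if_neg h, ih, recs]

-- ===== VERDICT (by name: the statement is the Claim_ definition above) =====
theorem gamingArray_spec : Claim_equal_gamingArray := by
  intro arr _ hpre
  unfold Spec_gamingArray
  obtain ⟨a0, t, rfl⟩ : ∃ a0 t, arr = a0 :: t := by
    cases arr with
    | nil => exact absurd rfl hpre
    | cons a0 t => exact ⟨a0, t, rfl⟩
  unfold gamingArray gamingArray_alt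
  rw [altLoop_eq (a0 :: t).length (a0 :: t) 0 (le_refl _)]
  simp only [PySem.List.pyGet?_zero_cons, PySem.List.len_eq]
  have hA := PySem.List.foldl_pyRange_pyGetD' (a0 :: t) 0
    (fun (s : Int × Int) v => if v > s.2 then (s.1 + 1, v) else s) ((1 : Int), a0) (a := 1) (by omega)
  simp only [hA, Int.toNat_one, List.drop_one, List.tail_cons, foldA, recTotal, zero_add]
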